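-- pv_equiv track=rewrite | github.com/oj-sec/fishfactory | processor.py | process_file_structure
-- ===== SOURCE A (Python) =====
-- def process_file_structure(zip_contents):
-- 	file_structure = []
--
-- 	zip_contents = list(dict.fromkeys(zip_contents))
--
-- 	while(True):
-- 		if len(zip_contents) == 0:
-- 			break
--
-- 		longest = max(zip_contents, key = len, default = None)
-- 		parts = longest.split("/")
-- 		parts.remove(parts[len(parts) - 1])
-- 		longest_processed = ''
-- 		for part in parts:
-- 			longest_processed = longest_processed + '/' + part
--
-- 		if len(file_structure) == 0:
-- 			file_structure.append(longest_processed)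
-- 			continue
-- 		for item in file_structure:
-- 			if longest != None:
-- 				if item.startswith(longest_processed) == True:
-- 					zip_contents.remove(longest)
-- 					break
-- 		if longest in zip_contents:
-- 			file_structure.append(longest_processed)
--
-- 	file_structure = [e.replace('./kits/temp/', '') for e in file_structure]
-- 	return file_structure
-- ===== SOURCE B (Python) =====
-- def process_file_structure(zip_contents):
-- 	# Same result as the original, but computed in one pass over a single
-- 	# length-descending stable sort instead of the quadratic
-- 	# while/max/remove loop (return value only; the input list is not rebound).
-- 	kept = []
-- 	for path in sorted(dict.fromkeys(zip_contents), key=len, reverse=True):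
-- 		segs = path.split('/')
-- 		segs.remove(segs[-1])
-- 		parent = ''
-- 		for s in segs:
-- 			parent = parent + '/' + s
-- 		if all(not k.startswith(parent) for k in kept):
-- 			kept.append(parent)
-- 	return [k.replace('./kits/temp/', '') for k in kept]
-- ===== Notes on version B (the rewrite author's own statement) =====
-- stated objective: faster
-- what changed: A repeatedly rescans and mutates the remaining list (max(key=len) plus list.remove inside a while loop, linear work per element); B sorts the deduplicated list once by length descending (a stable sort reproduces exactly A's processing order) and makes a single pass appending each parent path unless an already-kept entry starts with it.
import Mathlib
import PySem

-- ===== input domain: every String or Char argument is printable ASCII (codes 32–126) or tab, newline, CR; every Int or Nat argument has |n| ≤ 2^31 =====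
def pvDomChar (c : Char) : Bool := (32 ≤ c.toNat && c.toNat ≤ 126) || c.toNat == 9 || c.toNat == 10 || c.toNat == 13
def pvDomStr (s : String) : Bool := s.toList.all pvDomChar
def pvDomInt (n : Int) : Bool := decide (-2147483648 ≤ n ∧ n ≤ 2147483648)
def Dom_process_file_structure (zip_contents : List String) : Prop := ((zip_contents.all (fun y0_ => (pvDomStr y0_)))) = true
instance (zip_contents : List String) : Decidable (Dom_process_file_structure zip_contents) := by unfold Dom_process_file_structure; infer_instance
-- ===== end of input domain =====

-- B replaces A's quadratic while/max()/list.remove() selection loop by one stable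
-- length-descending sort followed by a single pass (same return value; A only rebinds
-- its local 'zip_contents', so neither version mutates the caller's list).

-- Shared helper: the parent-directory string both Pythons compute with the same three
-- lines (split on '/', remove first occurrence of the last segment, re-join each part
-- behind a '/'); the concatenation loop is done on List Char (kernel-reducible), exact.
def pfsParent (longest : String) : String :=
  let parts := (PySem.Str.split? longest "/").getD []          -- sep "/" ≠ "" : never none
  let last := PySem.List.pyGetD parts ((parts.length : Int) - 1) ""  -- split is never empty: in range
  let parts2 := (PySem.List.remove? parts last).getD parts     -- last ∈ parts : never none
  String.ofList (parts2.foldl (fun acc part => acc ++ '/' :: part.toList) [])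

-- ===== PORT A =====
-- A's while loop; fuel 2*len+1 is an upper bound on its iteration count (each element
-- is consumed in at most two iterations), purely a totality guard.
def pfsLoopA : Nat → List String → List String → List String
  | 0, _, fs => fs
  | fuel+1, zc, fs =>
    if zc.length = 0 then fs
    else
      let longest := (PySem.List.max? zc PySem.Str.len).getD ""   -- zc ≠ [] : never none
      let lp := pfsParent longest
      if fs.length = 0 then
        pfsLoopA fuel zc (fs ++ [lp])
      else
        -- 'for item in file_structure: if item.startswith(lp): zip_contents.remove(longest); break'
        let zc2 := if fs.any (fun item => PySem.Str.startswith item lp)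
                   then (PySem.List.remove? zc longest).getD zc   -- longest ∈ zc : never none
                   else zc
        if zc2.contains longest then pfsLoopA fuel zc2 (fs ++ [lp])
        else pfsLoopA fuel zc2 fs

def process_file_structure (zip_contents : List String) : List String :=
  let zc := PySem.List.dedup zip_contents
  (pfsLoopA (2 * zc.length + 1) zc []).map (fun e => PySem.Str.replace e "./kits/temp/" "")

-- ===== PORT B =====
def process_file_structure_alt (zip_contents : List String) : List String :=
  let kept := (PySem.List.sorted (PySem.List.dedup zip_contents) PySem.Str.len true).foldl
      (fun kept path =>
        let parent := pfsParent path
        if kept.all (fun k => !PySem.Str.startswith k parent) then kept ++ [parent] else kept) []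
  kept.map (fun k => PySem.Str.replace k "./kits/temp/" "")

-- ===== PRECONDITION & SPEC =====
def Spec_process_file_structure (zip_contents : List String) (out : List String) : Prop := out = process_file_structure_alt zip_contents
instance (zip_contents : List String) (out : List String) : Decidable (Spec_process_file_structure zip_contents out) := by unfold Spec_process_file_structure; infer_instance

-- ===== CLAIM (what is proved, stated in full; the proofs are below) =====
def Claim_equal_process_file_structure : Prop := ∀ (zip_contents : List String), Dom_process_file_structure zip_contents → Spec_process_file_structure zip_contents (process_file_structure zip_contents)

-- ===== LEMMAS AND PROOFS =====

-- B's loop body, named for the proofs (definitionally the lambda in the port of B).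
def pfsStep (kept : List String) (path : String) : List String :=
  let parent := pfsParent path
  if kept.all (fun k => !PySem.Str.startswith k parent) then kept ++ [parent] else kept

lemma pfs_startswith_self (s : String) : PySem.Str.startswith s s = true := by
  simp [PySem.Chars.startswith_iff]

lemma pfs_all_not_eq_not_any (l : List String) (p : String → Bool) :
    l.all (fun k => !p k) = !l.any p := by
  induction l with
  | nil => rfl
  | cons x xs ih => simp [List.all_cons, List.any_cons, ih, Bool.not_or]

lemma pfs_insertBy_cons_pos (before : String → String → Bool) (x y : String)
    (ys : List String) (h : before x y = true) :
    PySem.List.insertBy before x (y :: ys) = x :: y :: ys := by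
  simp [PySem.List.insertBy, h]

lemma pfs_insertBy_cons_neg (before : String → String → Bool) (x y : String)
    (ys : List String) (h : before x y = false) :
    PySem.List.insertBy before x (y :: ys) = y :: PySem.List.insertBy before x ys := by
  simp [PySem.List.insertBy, h]

lemma pfs_srt_snoc (xs : List String) (x : String) :
    PySem.List.sorted (xs ++ [x]) PySem.Str.len true =
      PySem.List.insertBy (fun a b => decide (PySem.Str.len b < PySem.Str.len a)) x
        (PySem.List.sorted xs PySem.Str.len true) := by
  rw [PySem.List.sorted_rev_eq_foldl_insertBy, PySem.List.sorted_rev_eq_foldl_insertBy,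
    List.foldl_append, List.foldl_cons, List.foldl_nil]

-- Selection characterisation of the stable reverse sort: its head is the FIRST
-- maximal element (Python's max) and its tail sorts the rest.
lemma pfs_srt_select : ∀ (xs : List String), xs.Nodup → ∀ m : String,
    PySem.List.max? xs PySem.Str.len = some m →
    PySem.List.sorted xs PySem.Str.len true =
      m :: PySem.List.sorted (xs.erase m) PySem.Str.len true := by
  intro xs
  induction xs using List.reverseRecOn with
  | nil => intro _ m hm; simp [PySem.List.max?] at hm
  | append_singleton xs x ih =>
    intro hnd m hm
    rcases List.nodup_append.mp hnd with ⟨hndxs, -, hdisj⟩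
    have hx : x ∉ xs := fun hxx => hdisj x hxx x (by simp) rfl
    cases hmx : PySem.List.max? xs PySem.Str.len with
    | none =>
      have hxs : xs = [] := (PySem.List.max?_eq_none_iff _ _).mp hmx
      subst hxs
      obtain rfl : x = m := Option.some.inj hm
      simp [PySem.List.sorted, PySem.List.insertBy]
    | some m0 =>
      have hmx2 := hmx
      unfold PySem.List.max? at hm hmx2
      rw [List.foldl_append, List.foldl_cons, List.foldl_nil, hmx2] at hm
      have hm' : (if PySem.Str.len m0 < PySem.Str.len x then some x else some m0) = some m := hm
      by_cases hlt : PySem.Str.len m0 < PySem.Str.len x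
      · rw [if_pos hlt] at hm'
        obtain rfl : x = m := Option.some.inj hm'
        rw [List.erase_append_right _ hx]
        simp only [List.erase_cons_head, List.append_nil]
        have e := ih hndxs m0 hmx
        rw [pfs_srt_snoc, e, pfs_insertBy_cons_pos _ _ _ _ (by simpa using hlt)]
      · rw [if_neg hlt] at hm'
        obtain rfl : m0 = m := Option.some.inj hm'
        have hmem : m0 ∈ xs := PySem.List.max?_mem hmx
        rw [List.erase_append_left _ hmem]
        have e := ih hndxs m0 hmx
        rw [pfs_srt_snoc, e, pfs_srt_snoc,
          pfs_insertBy_cons_neg _ _ _ _ (by simpa using hlt)]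

-- A's while loop, with enough fuel and a duplicate-free worklist, is exactly B's
-- single pass over the length-descending stable sort.
lemma pfs_loopA_eq : ∀ (fuel : Nat) (zc fs : List String), zc.Nodup →
    2 * zc.length + 1 ≤ fuel →
    pfsLoopA fuel zc fs = (PySem.List.sorted zc PySem.Str.len true).foldl pfsStep fs := by
  intro fuel
  induction fuel using Nat.strong_induction_on with
  | _ fuel ih =>
  intro zc fs hnd hf
  obtain ⟨f, rfl⟩ : ∃ f, fuel = f + 1 := ⟨fuel - 1, by omega⟩
  by_cases hz : zc = []
  · subst hz
    simp [pfsLoopA, PySem.List.sorted]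
  · obtain ⟨m, hm⟩ : ∃ m, PySem.List.max? zc PySem.Str.len = some m := by
      cases hmx : PySem.List.max? zc PySem.Str.len with
      | none => exact absurd ((PySem.List.max?_eq_none_iff _ _).mp hmx) hz
      | some m => exact ⟨m, rfl⟩
    have hmem : m ∈ zc := PySem.List.max?_mem hm
    have hget : (PySem.List.max? zc PySem.Str.len).getD "" = m := by rw [hm]; rfl
    have hrem : (PySem.List.remove? zc m).getD zc = zc.erase m := by
      rw [PySem.List.remove?_eq_some_erase zc m hmem]; rfl
    have hnm : m ∉ zc.erase m := hnd.not_mem_erase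
    have hcontF : (zc.erase m).contains m = false := by
      simpa using hnm
    have hlenpos : 0 < zc.length := List.length_pos_iff.mpr hz
    have hlener : (zc.erase m).length = zc.length - 1 := List.length_erase_of_mem hmem
    have hnder : (zc.erase m).Nodup := hnd.erase m
    have hsel := pfs_srt_select zc hnd m hm
    rw [hsel, List.foldl_cons]
    have hz' : ¬ zc.length = 0 := by omega
    by_cases hfs : fs = []
    · subst hfs
      obtain ⟨f', rfl⟩ : ∃ f', f = f' + 1 := ⟨f - 1, by omega⟩
      simp only [pfsLoopA, hget, hrem, hz', if_false, List.length_nil, List.nil_append,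
        List.length_cons, List.any_cons, List.any_nil, pfs_startswith_self,
        Bool.or_false, if_true, hcontF, Bool.false_eq_true, Nat.succ_ne_zero]
      rw [ih f' (by omega) (zc.erase m) [pfsParent m] hnder (by omega)]
      congr 1
    · have hfs' : ¬ fs.length = 0 := by
        simpa [List.length_eq_zero_iff] using hfs
      by_cases hany : fs.any (fun item => PySem.Str.startswith item (pfsParent m)) = true
      · simp only [pfsLoopA, hget, hrem, hz', if_false, hfs', hany, if_true, hcontF,
          Bool.false_eq_true]
        rw [ih f (by omega) (zc.erase m) fs hnder (by omega)]
        have hallF : fs.all (fun k => !PySem.Str.startswith k (pfsParent m)) = false := by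
          rw [pfs_all_not_eq_not_any, hany]; rfl
        have hstep : pfsStep fs m = fs := by
          simp only [pfsStep]; rw [hallF]; simp
        rw [hstep]
      · have hanyF : fs.any (fun item => PySem.Str.startswith item (pfsParent m)) = false :=
          by simpa using hany
        have hcontT : zc.contains m = true := by simpa using hmem
        obtain ⟨f', rfl⟩ : ∃ f', f = f' + 1 := ⟨f - 1, by omega⟩
        simp only [pfsLoopA, hget, hrem, hz', if_false, hfs', hanyF, hcontT, hcontF,
          List.length_append, List.length_cons, List.length_nil,
          Nat.succ_ne_zero, List.any_append, List.any_cons,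
          List.any_nil, pfs_startswith_self, Bool.or_false, Bool.or_true,
          Bool.false_eq_true, ite_true]
        rw [ih f' (by omega) (zc.erase m) (fs ++ [pfsParent m]) hnder (by omega)]
        have hallT : fs.all (fun k => !PySem.Str.startswith k (pfsParent m)) = true := by
          rw [pfs_all_not_eq_not_any, hanyF]; rfl
        have hstep : pfsStep fs m = fs ++ [pfsParent m] := by
          simp only [pfsStep]; rw [hallT]; simp
        rw [hstep]

-- ===== VERDICT (by name: the statement is the Claim_ definition above) =====
theorem process_file_structure_spec : Claim_equal_process_file_structure := by
  intro zc _
  simp only [Spec_process_file_structure, process_file_structure, process_file_structure_alt]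
  rw [pfs_loopA_eq (2 * (PySem.List.dedup zc).length + 1) (PySem.List.dedup zc) []
    (PySem.List.nodup_dedup zc) (le_refl _)]
  rfl
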